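-- pv_equiv track=rewrite | github.com/YashTayal04/DSA-Questions | Greedy Algorithms/binaryStrings.py | solve
-- ===== SOURCE A (Python) =====
-- def solve(A, B):
--     a=[0 for i in range(len(A))]
--     c=0
--     ans=0
--     for i in range(len(A)):
--         c+=a[i]
--         if (c%2==0 and A[i]=='1') or (c%2==1 and A[i]=='0'):
--             pass
--         else:
--             if i+B>len(A):
--                 return -1
--             else:
--                 ans+=1
--                 c+=1
--                 if i+B<len(A):
--                     a[i+B]-=1
--     return ans
-- ===== SOURCE B (Python) =====
-- def _flip(c):
--     return '1' if c == '0' else '0' if c == '1' else c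
--
-- def solve(A, B):
--     # Naive simulation: actually rewrite the window instead of bookkeeping flip parity.
--     s = list(A)
--     n = len(s)
--     ans = 0
--     for i in range(n):
--         if s[i] == '1':
--             continue
--         if i + B > n:
--             return -1
--         s[i:i + B] = [_flip(c) for c in s[i:i + B]]
--         ans += 1
--     return ans
-- ===== Notes on version B (the rewrite author's own statement) =====
-- stated objective: simpler
-- what changed: Replaces A's difference array and running flip-parity counter with a naive simulation that actually rewrites each length-B window in a character list and just tests whether the current character is '1'.
-- outside the precondition, e.g. on solve('00', 0): A returns 1, B returns 2; on solve('1x1x1001', -3): A returns 6, B returns 4; on solve('000', -4): A raises IndexError, B returns 3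
import Mathlib
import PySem

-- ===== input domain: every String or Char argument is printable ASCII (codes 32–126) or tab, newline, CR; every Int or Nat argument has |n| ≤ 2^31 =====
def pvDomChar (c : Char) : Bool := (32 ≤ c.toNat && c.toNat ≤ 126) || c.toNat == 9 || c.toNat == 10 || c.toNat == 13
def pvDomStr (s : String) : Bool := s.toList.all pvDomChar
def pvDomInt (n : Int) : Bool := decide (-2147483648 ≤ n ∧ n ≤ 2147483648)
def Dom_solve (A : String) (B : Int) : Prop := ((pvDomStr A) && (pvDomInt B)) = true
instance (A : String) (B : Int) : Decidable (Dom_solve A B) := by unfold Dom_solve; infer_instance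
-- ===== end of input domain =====

-- B replaces A's difference array + flip-parity counter by a naive simulation that actually
-- rewrites each length-B window of a character list (objective: simpler; B is O(n*B), not faster).

-- ===== PORT A =====
-- the for-loop of A: state (a, c, ans), index i; early return -1 kept as a direct result
def solveLoopA (l : List Char) (B : Int) (a : List Int) (c ans : Int) (i : Nat) : Int :=
  if h : i < l.length then
    let c2 := c + PySem.List.pyGetD a (i : Int) 0
    if (PySem.Int.mod c2 2 = 0 ∧ l[i] = '1') ∨ (PySem.Int.mod c2 2 = 1 ∧ l[i] = '0') then
      solveLoopA l B a c2 ans (i + 1)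
    else if (i : Int) + B > (l.length : Int) then -1
    else
      let a2 := if (i : Int) + B < (l.length : Int) then
          PySem.List.pySetD a ((i : Int) + B) (PySem.List.pyGetD a ((i : Int) + B) 0 - 1)
        else a
      solveLoopA l B a2 (c2 + 1) (ans + 1) (i + 1)
  else ans
termination_by l.length - i

def solve (A : String) (B : Int) : Int :=
  solveLoopA A.toList B (List.replicate A.toList.length 0) 0 0 0

-- ===== PORT B =====
-- _flip(c)
def flipChar (c : Char) : Char := if c = '0' then '1' else if c = '1' then '0' else c

-- the slice assignment s[i:i+B] = [_flip(c) for c in s[i:i+B]]: Python-exact for 0 ≤ i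
-- (clamped slice bounds; the replaced range is [start, max start stop))
def flipSeg (s : List Char) (i : Nat) (B : Int) : List Char :=
  let start := PySem.List.clampIdx s.length ((i : Nat) : Int)
  let stop := PySem.List.clampIdx s.length ((i : Int) + B)
  s.take start ++ (PySem.List.slice s (some ((i : Nat) : Int)) (some ((i : Int) + B))).map flipChar
    ++ s.drop (max start stop)

-- the for-loop of B: state (s, ans), index i; s[i] is in range since s keeps length n
def solveLoopB (l : List Char) (B : Int) (s : List Char) (ans : Int) (i : Nat) : Int :=
  if h : i < l.length then
    if s.getD i ' ' = '1' then solveLoopB l B s ans (i + 1)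
    else if (i : Int) + B > (l.length : Int) then -1
    else solveLoopB l B (flipSeg s i B) (ans + 1) (i + 1)
  else ans
termination_by l.length - i

def solve_alt (A : String) (B : Int) : Int :=
  solveLoopB A.toList B A.toList 0 0

-- ===== PRECONDITION & SPEC =====
-- Pre_ restricts to the task's natural domain of positive flip lengths B ≥ 1: for B ≤ 0 a flip
-- rewrites no window at all, yet A's zero-length flip still toggles the parity of every later
-- position and a negative B hits negative-index wraparound or IndexError in `a[i+B] -= 1`.
def Pre_solve (A : String) (B : Int) : Prop := 1 ≤ B
instance (A : String) (B : Int) : Decidable (Pre_solve A B) := by unfold Pre_solve; infer_instance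
def pvWitness_solve : String × Int := ("1011", 2)

def Spec_solve (A : String) (B : Int) (out : Int) : Prop := out = solve_alt A B
instance (A : String) (B : Int) (out : Int) : Decidable (Spec_solve A B out) := by unfold Spec_solve; infer_instance

-- ===== CLAIM (what is proved, stated in full; the proofs are below) =====
def Claim_equal_solve : Prop := ∀ (A : String) (B : Int), Dom_solve A B → Pre_solve A B → Spec_solve A B (solve A B)

-- ===== LEMMAS AND PROOFS =====

-- effective character at flip-parity p
def eff (p : Int) (ch : Char) : Char := if PySem.Int.mod p 2 = 0 then ch else flipChar ch

lemma mod_two_01 (p : Int) : PySem.Int.mod p 2 = 0 ∨ PySem.Int.mod p 2 = 1 := by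
  rw [PySem.Int.mod_eq_emod_of_pos (by omega)]; omega

lemma flipChar_flipChar (ch : Char) : flipChar (flipChar ch) = ch := by
  unfold flipChar; split_ifs <;> simp_all

lemma eff_succ (p : Int) (ch : Char) : eff (p + 1) ch = flipChar (eff p ch) := by
  unfold eff
  have h1 : PySem.Int.mod p 2 = (p % 2) := PySem.Int.mod_eq_emod_of_pos (by omega)
  have h2 : PySem.Int.mod (p + 1) 2 = ((p + 1) % 2) := PySem.Int.mod_eq_emod_of_pos (by omega)
  rcases mod_two_01 p with h | h
  · rw [h, show PySem.Int.mod (p + 1) 2 = 1 from by rw [h2]; rw [h1] at h; omega]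
    simp
  · rw [h, show PySem.Int.mod (p + 1) 2 = 0 from by rw [h2]; rw [h1] at h; omega]
    simp [flipChar_flipChar]

lemma pass_iff (p : Int) (ch : Char) :
    ((PySem.Int.mod p 2 = 0 ∧ ch = '1') ∨ (PySem.Int.mod p 2 = 1 ∧ ch = '0')) ↔ eff p ch = '1' := by
  unfold eff
  rcases mod_two_01 p with h | h <;> rw [h] <;> simp <;> unfold flipChar <;> split_ifs <;> simp_all

lemma getD_set_eq (a : List Int) (m j : Nat) (v : Int) :
    (a.set m v).getD j 0 = if m = j ∧ m < a.length then v else a.getD j 0 := by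
  simp [List.getD_eq_getElem?_getD, List.getElem?_set]
  split_ifs <;> simp_all <;> omega

-- the normal form flipSeg takes under Pre_ (1 ≤ B, i + B ≤ len s)
def flipCore (s : List Char) (i b : Nat) : List Char :=
  s.take i ++ ((s.drop i).take b).map flipChar ++ s.drop (i + b)

lemma flipSeg_eq (s : List Char) (i : Nat) (B : Int) (hB : 1 ≤ B) (h : i + B.toNat ≤ s.length) :
    flipSeg s i B = flipCore s i B.toNat := by
  unfold flipSeg flipCore
  have hm : (i : Int) + B = ((i + B.toNat : Nat) : Int) := by push_cast; omega
  rw [hm, PySem.List.slice_natCast, PySem.List.clampIdx_natCast, PySem.List.clampIdx_natCast]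
  have h1 : min i s.length = i := by omega
  have h2 : min (i + B.toNat) s.length = i + B.toNat := by omega
  rw [h1, h2, show i + B.toNat - i = B.toNat from by omega]
  simp

lemma length_flipCore (s : List Char) (i b : Nat) (h : i + b ≤ s.length) :
    (flipCore s i b).length = s.length := by
  unfold flipCore; simp; omega

lemma getD_flipCore (s : List Char) (i b j : Nat) (h : i + b ≤ s.length) :
    (flipCore s i b).getD j ' ' =
      if i ≤ j ∧ j < i + b then flipChar (s.getD j ' ') else s.getD j ' ' := by
  have e1 : (s.take i).length = i := by simp; omega
  have e2 : (((s.drop i).take b).map flipChar).length = b := by simp; omega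
  by_cases hj : j < s.length
  · unfold flipCore
    rw [List.getD_eq_getElem?_getD, List.append_assoc]
    by_cases h1 : j < i
    · rw [List.getElem?_append_left (by omega), List.getElem?_take_of_lt h1, if_neg (by omega),
        List.getD_eq_getElem?_getD]
    · rw [List.getElem?_append_right (by omega), e1]
      by_cases h2 : j < i + b
      · rw [List.getElem?_append_left (by omega), List.getElem?_map,
          List.getElem?_take_of_lt (by omega), List.getElem?_drop,
          show i + (j - i) = j from by omega, if_pos ⟨by omega, h2⟩,
          List.getD_eq_getElem?_getD, List.getElem?_eq_getElem hj]
        simp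
      · rw [List.getElem?_append_right (by omega), e2, List.getElem?_drop,
          show i + b + (j - i - b) = j from by omega, if_neg (by omega),
          List.getD_eq_getElem?_getD]
  · rw [List.getD_eq_default _ _ (by rw [length_flipCore s i b h]; omega),
      if_neg (by omega), List.getD_eq_default _ _ (by omega)]

lemma sum_Icc_bot (f : Nat → Int) (i j : Nat) (h : i ≤ j) :
    ∑ k ∈ Finset.Icc i j, f k = f i + ∑ k ∈ Finset.Icc (i + 1) j, f k := by
  rw [Finset.Icc_eq_cons_Ioc h, Finset.sum_cons, Finset.Icc_add_one_left_eq_Ioc]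

-- main loop equivalence: A's (a, c) and B's rewritten list s agree through the effective character
theorem loop_eq (l : List Char) (B : Int) (hB : 1 ≤ B) (i : Nat) (a : List Int) (c ans : Int)
    (s : List Char)
    (hla : a.length = l.length) (hls : s.length = l.length)
    (hs : ∀ j, i ≤ j → j < l.length →
      s.getD j ' ' = eff (c + ∑ k ∈ Finset.Icc i j, a.getD k 0) (l.getD j ' ')) :
    solveLoopA l B a c ans i = solveLoopB l B s ans i := by
  rw [solveLoopA, solveLoopB]
  by_cases hi : i < l.length
  · simp only [dif_pos hi, PySem.List.pyGetD_natCast]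
    have hc2 : s.getD i ' ' = eff (c + a.getD i 0) (l.getD i ' ') := by
      have := hs i le_rfl hi
      rwa [Finset.Icc_self, Finset.sum_singleton] at this
    have hgl : l.getD i ' ' = l[i] := List.getD_eq_getElem l ' ' hi
    by_cases hcond : (PySem.Int.mod (c + a.getD i 0) 2 = 0 ∧ l[i] = '1') ∨
        (PySem.Int.mod (c + a.getD i 0) 2 = 1 ∧ l[i] = '0')
    · -- pass: B sees s[i] = '1'
      have hB1 : s.getD i ' ' = '1' := by
        rw [hc2, hgl]; exact (pass_iff _ _).mp hcond
      simp only [if_pos hcond, if_pos hB1]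
      apply loop_eq l B hB (i + 1) a (c + a.getD i 0) ans s hla hls
      intro j hj hjn
      rw [hs j (by omega) hjn]
      congr 1
      rw [sum_Icc_bot _ _ _ (by omega)]
      ring
    · have hB1 : ¬ s.getD i ' ' = '1' := by
        rw [hc2, hgl]; exact fun h => hcond ((pass_iff _ _).mpr h)
      simp only [if_neg hcond, if_neg hB1]
      by_cases hover : (i : Int) + B > (l.length : Int)
      · simp only [if_pos hover]
      · simp only [if_neg hover]
        have hbn : i + B.toNat ≤ l.length := by omega
        have hm : (i : Int) + B = ((i + B.toNat : Nat) : Int) := by push_cast; omega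
        by_cases hin : (i : Int) + B < (l.length : Int)
        · rw [hm] at hin
          simp only [if_pos hin, hm, PySem.List.pySetD_natCast, PySem.List.pyGetD_natCast]
          apply loop_eq l B hB (i + 1) _ (c + a.getD i 0 + 1) (ans + 1) (flipSeg s i B)
          · simp [hla]
          · rw [flipSeg_eq s i B hB (by omega), length_flipCore s i B.toNat (by omega), hls]
          · intro j hj hjn
            rw [flipSeg_eq s i B hB (by omega), getD_flipCore s i B.toNat j (by omega), hs j (by omega) hjn,
              sum_Icc_bot _ _ _ (by omega)]
            by_cases hwin : j < i + B.toNat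
            · -- inside the window: the decrement at i+B.toNat lies beyond j, parity +1
              rw [if_pos ⟨by omega, hwin⟩]
              have heq : ∑ k ∈ Finset.Icc (i + 1) j,
                  (a.set (i + B.toNat) (a.getD (i + B.toNat) 0 - 1)).getD k 0
                  = ∑ k ∈ Finset.Icc (i + 1) j, a.getD k 0 := by
                apply Finset.sum_congr rfl
                intro k hk
                simp only [Finset.mem_Icc] at hk
                rw [getD_set_eq, if_neg (by omega)]
              rw [heq, ← eff_succ]
              congr 1; ring
            · -- past the window: the decrement at i+B.toNat ∈ Icc (i+1) j cancels the +1
              rw [if_neg (by omega)]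
              have hmem : i + B.toNat ∈ Finset.Icc (i + 1) j := by
                simp only [Finset.mem_Icc]; omega
              rw [← Finset.sum_erase_add _ _ hmem, ← Finset.sum_erase_add _ _ hmem]
              have h1 : ∑ k ∈ (Finset.Icc (i + 1) j).erase (i + B.toNat),
                  (a.set (i + B.toNat) (a.getD (i + B.toNat) 0 - 1)).getD k 0
                  = ∑ k ∈ (Finset.Icc (i + 1) j).erase (i + B.toNat), a.getD k 0 := by
                apply Finset.sum_congr rfl
                intro k hk
                rw [getD_set_eq, if_neg (by intro hh; exact (Finset.ne_of_mem_erase hk) hh.1.symm)]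
              rw [h1, getD_set_eq, if_pos ⟨rfl, by rw [hla]; exact_mod_cast hin⟩]
              congr 1; ring
        · simp only [if_neg hin]
          -- i + B = length: every later j lies inside the window
          apply loop_eq l B hB (i + 1) a (c + a.getD i 0 + 1) (ans + 1) (flipSeg s i B) hla
          · rw [flipSeg_eq s i B hB (by omega), length_flipCore s i B.toNat (by omega), hls]
          · intro j hj hjn
            rw [flipSeg_eq s i B hB (by omega), getD_flipCore s i B.toNat j (by omega), if_pos ⟨by omega, by omega⟩,
              hs j (by omega) hjn, sum_Icc_bot _ _ _ (by omega), ← eff_succ]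
            congr 1; ring
  · simp only [dif_neg hi]
termination_by l.length - i
decreasing_by all_goals omega

-- ===== VERDICT (by name: the statement is the Claim_ definition above) =====
theorem solve_spec : Claim_equal_solve := by
  intro A B _ hB
  unfold Spec_solve solve solve_alt
  apply loop_eq A.toList B hB 0 _ 0 0 A.toList (by simp) rfl
  intro j _ hj
  have hz : ∑ k ∈ Finset.Icc 0 j, (List.replicate A.toList.length (0 : Int)).getD k 0 = 0 := by
    apply Finset.sum_eq_zero
    intro k _
    simp [List.getD_eq_getElem?_getD, List.getElem?_replicate]
    split_ifs <;> rfl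
  rw [hz]
  unfold eff
  rw [if_pos (by decide)]
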